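-- pv_equiv track=rewrite | github.com/annhilati/modules | ametrine/calc/sqrt.py | simplify_sqrt_div
-- ===== SOURCE A (Python) =====
-- from math import isqrt, gcd
--
-- def simplify_sqrt_div(n, denom):
--         """Vereinfacht sqrt(n)/denom zu k*sqrt(r)/d"""
--         k = 1
--         for i in range(2, isqrt(n)+1):
--             while n % (i*i) == 0:
--                 n //= i*i
--                 k *= i
--         g = gcd(k, denom)
--         k //= g
--         denom //= g
--         return k, n, denom
-- ===== SOURCE B (Python) =====
-- from math import isqrt, gcd
--
-- def simplify_sqrt_div(n, denom):
--     """Vereinfacht sqrt(n)/denom zu k*sqrt(r)/d"""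
--     # Select the largest s with s*s dividing n (the root of n's largest
--     # square divisor) in one scan, instead of factoring n; divide once.
--     k = 1
--     for s in range(2, isqrt(n) + 1):
--         if n % (s * s) == 0:
--             k = s
--     g = gcd(k, denom)
--     return k // g, n // (k * k), denom // g
-- ===== Notes on version B (the rewrite author's own statement) =====
-- stated objective: alternative
-- what changed: B never factors or mutates n: it scans s = 2..isqrt(n) once and keeps the largest s with s*s | n (the root of n's largest square divisor), then computes the residual by a single division n // (k*k); A instead repeatedly peels i*i pairs off n in a nested while loop, accumulating k as a product of extracted factors. The gcd reduction of k/denom is unchanged.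
import Mathlib
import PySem

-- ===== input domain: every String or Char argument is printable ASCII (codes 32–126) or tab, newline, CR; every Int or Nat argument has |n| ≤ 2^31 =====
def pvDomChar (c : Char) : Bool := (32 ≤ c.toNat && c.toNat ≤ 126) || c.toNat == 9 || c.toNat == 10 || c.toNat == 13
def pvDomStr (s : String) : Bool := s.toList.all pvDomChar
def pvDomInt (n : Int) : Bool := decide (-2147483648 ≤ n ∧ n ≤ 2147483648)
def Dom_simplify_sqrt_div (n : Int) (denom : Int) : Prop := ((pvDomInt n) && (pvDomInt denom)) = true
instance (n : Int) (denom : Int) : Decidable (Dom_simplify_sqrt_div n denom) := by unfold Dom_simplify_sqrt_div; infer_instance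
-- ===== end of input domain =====

-- B selects the largest s ≤ isqrt(n) with s*s | n in one scan and divides n by k*k
-- once, instead of A's nested loop peeling i*i pairs off n; objective: alternative
-- (same O(sqrt n) cost, genuinely different algorithm).

-- ===== PORT A =====

-- math.isqrt, exact for 0 ≤ n (Pre_ excludes n < 0, where Python raises ValueError)
def pvISqrt (n : Int) : Int := (Nat.sqrt n.toNat : Int)

-- 'while n % (i*i) == 0: n //= i*i; k *= i'.  The fuel argument only makes the
-- recursion total; it is called with n.toNat, which bounds the iteration count
-- whenever the Python loop terminates (0 < n).
def pvWhileA (i : Int) : Nat → Int × Int → Int × Int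
  | 0, s => s
  | fuel+1, (n, k) =>
    if PySem.Int.mod n (i*i) = 0 then
      pvWhileA i fuel (PySem.Int.floordiv n (i*i), k * i)
    else (n, k)

def pvStepA (st : Int × Int) (i : Int) : Int × Int := pvWhileA i st.1.toNat st

def simplify_sqrt_div (n : Int) (denom : Int) : Int × Int × Int :=
  let s := (PySem.List.pyRange 2 (pvISqrt n + 1) 1).foldl pvStepA (n, 1)
  let g : Int := Int.gcd s.2 denom
  (PySem.Int.floordiv s.2 g, s.1, PySem.Int.floordiv denom g)

-- ===== PORT B =====

-- 'if n % (s*s) == 0: k = s' — keep the largest square root divisor seen so far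
def pvStepB (n : Int) (k : Int) (s : Int) : Int :=
  if PySem.Int.mod n (s*s) = 0 then s else k

def simplify_sqrt_div_alt (n : Int) (denom : Int) : Int × Int × Int :=
  let k := (PySem.List.pyRange 2 (pvISqrt n + 1) 1).foldl (pvStepB n) 1
  let g : Int := Int.gcd k denom
  (PySem.Int.floordiv k g, PySem.Int.floordiv n (k*k), PySem.Int.floordiv denom g)

-- ===== PRECONDITION & SPEC =====
-- Python's math.isqrt raises ValueError for n < 0, so A returns exactly on 0 ≤ n.
def Pre_simplify_sqrt_div (n : Int) (denom : Int) : Prop := 0 ≤ n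
instance (n : Int) (denom : Int) : Decidable (Pre_simplify_sqrt_div n denom) := by
  unfold Pre_simplify_sqrt_div; infer_instance

def pvWitness_simplify_sqrt_div : Int × Int := (48, 6)

def Spec_simplify_sqrt_div (n : Int) (denom : Int) (out : Int × Int × Int) : Prop := out = simplify_sqrt_div_alt n denom
instance (n : Int) (denom : Int) (out : Int × Int × Int) : Decidable (Spec_simplify_sqrt_div n denom out) := by unfold Spec_simplify_sqrt_div; infer_instance

-- ===== CLAIM (what is proved, stated in full; the proofs are below) =====
def Claim_equal_simplify_sqrt_div : Prop := ∀ (n : Int) (denom : Int), Dom_simplify_sqrt_div n denom → Pre_simplify_sqrt_div n denom → Spec_simplify_sqrt_div n denom (simplify_sqrt_div n denom)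

-- ===== LEMMAS AND PROOFS =====

-- invariant for A's fold after processing loop indices 2..m, with n0 the original n:
-- k*k*nA = n0, both positive, and no square of a prime ≤ m divides nA.
def pvInvA (n0 m nA k : Int) : Prop :=
  k * k * nA = n0 ∧ 0 < nA ∧ 0 < k ∧
  (∀ p : Int, Prime p → 0 < p → p ≤ m → ¬ p * p ∣ nA)

theorem int_prime_two_le {p : Int} (hp : Prime p) (h0 : 0 < p) : 2 ≤ p := by
  by_contra h
  push_neg at h
  have h1 : p = 1 := by omega
  exact hp.ne_one h1

theorem whileA_spec (i c k : Int) (e fuel : Nat) (hi : 2 ≤ i) (hc0 : 0 < c)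
    (hic : ¬ i ∣ c) (hf : e / 2 ≤ fuel) :
    pvWhileA i fuel (i ^ e * c, k) = (i ^ (e % 2) * c, k * i ^ (e / 2)) := by
  induction e using Nat.strong_induction_on generalizing k fuel with
  | _ e ih =>
  match e with
  | 0 =>
    have hnd : ¬ (PySem.Int.mod c (i*i) = 0) := by
      rw [PySem.Int.mod_eq_zero_iff_dvd]
      exact fun h => hic ((dvd_mul_right i i).trans h)
    simp only [pow_zero, one_mul, Nat.zero_mod, Nat.zero_div, mul_one]
    cases fuel with
    | zero => rfl
    | succ f => simp [pvWhileA, hnd]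
  | 1 =>
    have hnd : ¬ (PySem.Int.mod (i * c) (i*i) = 0) := by
      rw [PySem.Int.mod_eq_zero_iff_dvd]
      intro h
      exact hic ((mul_dvd_mul_iff_left (show i ≠ 0 by omega)).mp h)
    simp only [pow_one]
    cases fuel with
    | zero => norm_num [pvWhileA]
    | succ f => simp [pvWhileA, hnd]
  | (e+2) =>
    obtain ⟨f, rfl⟩ : ∃ f, fuel = f + 1 := ⟨fuel - 1, by omega⟩
    have hdvd : i * i ∣ i ^ (e+2) * c := by
      refine Dvd.dvd.mul_right ?_ c
      exact ⟨i ^ e, by ring⟩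
    have hg : PySem.Int.mod (i ^ (e+2) * c) (i*i) = 0 :=
      (PySem.Int.mod_eq_zero_iff_dvd _ _).mpr hdvd
    have hfd : PySem.Int.floordiv (i ^ (e+2) * c) (i*i) = i ^ e * c := by
      rw [PySem.Int.floordiv_eq_ediv_of_pos (show (0:Int) < i*i by nlinarith),
        show i ^ (e+2) * c = (i * i) * (i ^ e * c) by ring]
      exact Int.mul_ediv_cancel_left _ (by nlinarith)
    simp only [pvWhileA, hg, if_pos, hfd]
    rw [ih e (by omega) (k * i) f (by omega)]
    have h1 : (e+2) % 2 = e % 2 := by omega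
    have h2 : (e+2) / 2 = e / 2 + 1 := by omega
    rw [h1, h2, pow_succ]
    simp only [Prod.mk.injEq, true_and]
    ring

-- the fuel n.toNat is always sufficient: i^e ∣ n with 0 < n forces e ≤ n.toNat
theorem exp_le_toNat {i n : Int} {e : Nat} (hi : 2 ≤ i) (hn : 0 < n) (h : i ^ e ∣ n) :
    e ≤ n.toNat := by
  have h1 : i ^ e ≤ n := Int.le_of_dvd hn h
  have h2 : (2:Int) ^ e ≤ i ^ e := pow_le_pow_left₀ (by norm_num) hi e
  have h3 : (e:Int) < 2 ^ e := by exact_mod_cast Nat.lt_two_pow_self (n := e)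
  omega

theorem exists_maxPow (i n : Int) (hi : 2 ≤ i) (hn : 0 < n) :
    ∃ e : Nat, i ^ e ∣ n ∧ ¬ i ^ (e+1) ∣ n := by
  have hP : ∃ t : Nat, ¬ i ^ t ∣ n := by
    refine ⟨n.toNat + 1, fun h => ?_⟩
    have := exp_le_toNat hi hn h
    omega
  classical
  have h0 : Nat.find hP ≠ 0 := by
    intro h
    have := Nat.find_spec hP
    rw [h] at this
    simp at this
  refine ⟨Nat.find hP - 1, ?_, ?_⟩
  · have := Nat.find_min hP (m := Nat.find hP - 1) (by omega)
    simpa using this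
  · have := Nat.find_spec hP
    rwa [show Nat.find hP - 1 + 1 = Nat.find hP by omega]

-- while loop that does nothing (guard false at entry), for composite loop indices
theorem whileA_id (i n k : Int) (fuel : Nat) (h : ¬ i * i ∣ n) :
    pvWhileA i fuel (n, k) = (n, k) := by
  have hnd : ¬ (PySem.Int.mod n (i*i) = 0) := by
    rw [PySem.Int.mod_eq_zero_iff_dvd]; exact h
  cases fuel with
  | zero => rfl
  | succ f => simp [pvWhileA, hnd]

theorem stepA_inv (n0 m i nA k : Int) (hi : 2 ≤ i) (him : m + 1 = i)
    (h : pvInvA n0 m nA k) :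
    pvInvA n0 i (pvStepA (nA, k) i).1 (pvStepA (nA, k) i).2 := by
  obtain ⟨hE, hA0, hk0, h4⟩ := h
  by_cases hp : Prime i
  · obtain ⟨e, hdvd, hnd⟩ := exists_maxPow i nA hi hA0
    obtain ⟨c, hc⟩ := hdvd
    have hipow : (0:Int) < i ^ e := by positivity
    have hc0 : 0 < c := by nlinarith
    have hic : ¬ i ∣ c := by
      rintro ⟨d, hd⟩
      exact hnd ⟨d, by rw [hc, hd, pow_succ]; ring⟩
    have heA : e ≤ nA.toNat := exp_le_toNat hi hA0 (hc ▸ dvd_mul_right _ _)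
    have hwA := whileA_spec i c k e nA.toNat hi hc0 hic (by omega)
    rw [← hc] at hwA
    simp only [pvStepA, hwA]
    have hee : 2 * (e / 2) + e % 2 = e := by omega
    refine ⟨?_, by positivity, by positivity, ?_⟩
    · rw [← hE, hc]
      rw [show k * i ^ (e / 2) * (k * i ^ (e / 2)) * (i ^ (e % 2) * c)
          = k * k * (i ^ (e / 2) * i ^ (e / 2) * i ^ (e % 2) * c) by ring,
        show i ^ (e / 2) * i ^ (e / 2) * i ^ (e % 2) = i ^ (2 * (e / 2) + e % 2) by
          rw [pow_add, two_mul, pow_add],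
        hee]
    · intro p hp' hp0 hpi hsq
      by_cases hpi' : p = i
      · subst hpi'
        have h2 : p ^ 2 ∣ c * p ^ (e % 2) := by
          rw [mul_comm c (p ^ (e % 2)), ← pow_two] at *
          exact hsq
        have h3 : p ^ 2 ∣ p ^ (e % 2) :=
          Prime.pow_dvd_of_dvd_mul_left hp' 2 hic h2
        rcases Nat.mod_two_eq_zero_or_one e with he | he <;> rw [he] at h3
        · have h4' : p ^ 2 ≤ 1 := Int.le_of_dvd one_pos (by simpa using h3)
          nlinarith
        · have h4' : p ∣ 1 := by
            have : p * p ∣ p * 1 := by simpa [pow_two] using h3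
            exact (mul_dvd_mul_iff_left (show p ≠ 0 by omega)).mp this
          have := Int.le_of_dvd one_pos h4'
          omega
      · have hsub : i ^ (e % 2) * c ∣ nA := by
          refine ⟨i ^ (e - e % 2), ?_⟩
          have hpow : i ^ (e:Nat) = i ^ (e % 2) * i ^ (e - e % 2) := by
            rw [← pow_add]
            congr 1
            omega
          rw [hc, hpow]
          ring
        exact h4 p hp' hp0 (by omega) (hsq.trans hsub)
  · -- composite loop index: the while loop does nothing
    obtain ⟨p, hp', hp0, hplt, hpd⟩ : ∃ p : Int, Prime p ∧ 0 < p ∧ p < i ∧ p ∣ i := by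
      have h2 : i.natAbs ≠ 1 := by omega
      obtain ⟨q, hqp, hqd⟩ := Nat.exists_prime_and_dvd h2
      have hqd' : (q:Int) ∣ i := by
        have := Int.natCast_dvd_natCast.mpr hqd
        rwa [Int.natAbs_of_nonneg (by omega : (0:Int) ≤ i)] at this
      have hqprime : Prime (q:Int) := Int.prime_iff_natAbs_prime.mpr (by simpa using hqp)
      refine ⟨(q:Int), hqprime, by exact_mod_cast hqp.pos, ?_, hqd'⟩
      rcases lt_or_eq_of_le (Int.le_of_dvd (by omega) hqd') with h' | h'
      · exact h'
      · exact absurd (h' ▸ hqprime) hp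
    have hiA : ¬ i * i ∣ nA := fun h' =>
      h4 p hp' hp0 (by omega) ((mul_dvd_mul hpd hpd).trans h')
    simp only [pvStepA]
    rw [whileA_id i nA k nA.toNat hiA]
    refine ⟨hE, hA0, hk0, ?_⟩
    intro q hq hq0 hqi
    have hne : q ≠ i := fun h' => hp (h' ▸ hq)
    exact h4 q hq hq0 (by omega)

theorem foldA_inv (L : Nat) : ∀ (n0 m b nA k : Int), (b - (m+1)).toNat = L → 1 ≤ m →
    pvInvA n0 m nA k →
    pvInvA n0 (max m (b-1))
      (((PySem.List.pyRange (m+1) b 1).foldl pvStepA (nA, k)).1)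
      (((PySem.List.pyRange (m+1) b 1).foldl pvStepA (nA, k)).2) := by
  induction L with
  | zero =>
    intro n0 m b nA k hL hm hInv
    have hb : b ≤ m + 1 := by omega
    rw [PySem.List.pyRange_one_eq_nil hb]
    simp only [List.foldl_nil]
    rw [max_eq_left (by omega)]
    exact hInv
  | succ L ih =>
    intro n0 m b nA k hL hm hInv
    have hb : m + 1 < b := by omega
    rw [PySem.List.pyRange_one_cons hb]
    simp only [List.foldl_cons]
    have hInv' := stepA_inv n0 m (m+1) nA k (by omega) rfl hInv
    have := ih n0 (m+1) b (pvStepA (nA, k) (m+1)).1 (pvStepA (nA, k) (m+1)).2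
      (by omega) (by omega) hInv'
    rw [max_eq_right (by omega)] at this ⊢
    rw [show m + 1 + 1 = m + 2 by ring] at this ⊢
    simpa using this

-- maximality: if nA is squarefree and s*s ∣ k*k*nA then s ≤ k  (via Nat.factorization)
theorem max_sq_div (nA k s : Int) (h0 : 0 < nA) (hk : 0 < k) (hs : 0 < s)
    (hsf : ∀ p : Int, Prime p → ¬ p * p ∣ nA) (hdvd : s * s ∣ k * k * nA) : s ≤ k := by
  lift nA to ℕ using h0.le with a
  lift k to ℕ using hk.le with K
  lift s to ℕ using hs.le with S
  have ha0 : a ≠ 0 := by exact_mod_cast h0.ne'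
  have hK0 : K ≠ 0 := by exact_mod_cast hk.ne'
  have hS0 : S ≠ 0 := by exact_mod_cast hs.ne'
  have hsfN : Squarefree a := by
    rw [Nat.squarefree_iff_prime_squarefree]
    intro p hp hpd
    exact hsf (p:Int) (Nat.prime_iff_prime_int.mp hp) (by exact_mod_cast hpd)
  have hdvdN : S * S ∣ K * K * a := by exact_mod_cast hdvd
  have hSK : S ∣ K := by
    rw [← Nat.factorization_le_iff_dvd hS0 hK0]
    intro p
    by_cases hp : p.Prime
    · have h1 : (S*S).factorization p ≤ (K*K*a).factorization p :=
        (Nat.factorization_le_iff_dvd (by positivity) (by positivity)).mpr hdvdN p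
      rw [Nat.factorization_mul hS0 hS0] at h1
      rw [Nat.factorization_mul (by positivity) ha0,
        Nat.factorization_mul hK0 hK0] at h1
      have h2 : a.factorization p ≤ 1 := hsfN.natFactorization_le_one p
      simp only [Finsupp.add_apply] at h1
      omega
    · simp [Nat.factorization_eq_zero_of_non_prime _ hp]
  exact_mod_cast Nat.le_of_dvd (by omega) hSK

-- B's fold over an index range with no hit returns the accumulator unchanged
theorem foldB_none (L : Nat) : ∀ (n a b k0 : Int), (b - a).toNat = L →
    (∀ s : Int, a ≤ s → s < b → ¬ s * s ∣ n) →
    (PySem.List.pyRange a b 1).foldl (pvStepB n) k0 = k0 := by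
  induction L with
  | zero =>
    intro n a b k0 hL _
    rw [PySem.List.pyRange_one_eq_nil (by omega)]
    rfl
  | succ L ih =>
    intro n a b k0 hL hno
    have hb : a < b := by omega
    rw [PySem.List.pyRange_one_cons hb]
    simp only [List.foldl_cons]
    have hnd : ¬ (PySem.Int.mod n (a*a) = 0) := by
      rw [PySem.Int.mod_eq_zero_iff_dvd]
      exact hno a le_rfl hb
    simp only [pvStepB, hnd, if_neg, not_false_iff]
    exact ih n (a+1) b k0 (by omega) (fun s h1 h2 => hno s (by omega) h2)

-- B's fold returns kA when kA lies in the range, kA*kA ∣ n and kA is maximal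
theorem foldB_max (L : Nat) : ∀ (n a b k0 kA : Int), (b - a).toNat = L →
    a ≤ kA → kA < b → kA * kA ∣ n →
    (∀ s : Int, a ≤ s → s < b → s * s ∣ n → s ≤ kA) →
    (PySem.List.pyRange a b 1).foldl (pvStepB n) k0 = kA := by
  induction L with
  | zero =>
    intro n a b k0 kA hL h1 h2 _ _
    omega
  | succ L ih =>
    intro n a b k0 kA hL h1 h2 hdvd hmax
    have hb : a < b := by omega
    rw [PySem.List.pyRange_one_cons hb]
    simp only [List.foldl_cons]
    rcases eq_or_lt_of_le h1 with hEq | hlt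
    · -- a = kA: this step sets kA; no later index can hit
      subst hEq
      have hg : PySem.Int.mod n (a*a) = 0 := (PySem.Int.mod_eq_zero_iff_dvd _ _).mpr hdvd
      simp only [pvStepB, hg, if_pos]
      exact foldB_none ((b - (a+1)).toNat) n (a+1) b a rfl
        (fun s hs1 hs2 hsd => absurd (hmax s (by omega) hs2 hsd) (by omega))
    · exact congrArg (fun k0 => (PySem.List.pyRange (a+1) b 1).foldl (pvStepB n) k0) rfl ▸
        ih n (a+1) b (pvStepB n k0 a) kA (by omega) (by omega) h2 hdvd
          (fun s hs1 hs2 => hmax s (by omega) hs2)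

-- s*s ≤ n (0 ≤ s) implies s ≤ isqrt n
theorem le_isqrt (s n : Int) (hs : 0 ≤ s) (h : s * s ≤ n) : s ≤ pvISqrt n := by
  have hs' : ((s.toNat : Int)) = s := Int.toNat_of_nonneg hs
  have e1 : ((s.toNat * s.toNat : Nat) : Int) = s * s := by push_cast [hs']; ring
  have hn0 : (0:Int) ≤ n := le_trans (mul_nonneg hs hs) h
  have h1 : s.toNat * s.toNat ≤ n.toNat := by omega
  have h2 : s.toNat ≤ Nat.sqrt n.toNat := Nat.le_sqrt'.mpr (by rw [pow_two]; exact h1)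
  unfold pvISqrt
  omega

-- ===== VERDICT (by name: the statement is the Claim_ definition above) =====
theorem simplify_sqrt_div_spec : Claim_equal_simplify_sqrt_div := by
  intro n denom _ hpre
  unfold Spec_simplify_sqrt_div
  rcases eq_or_lt_of_le hpre with h0 | h0
  · -- n = 0 : the range is empty and both programs return (1, 0, denom)
    rw [← h0]
    have hsq : pvISqrt 0 = 0 := by simp [pvISqrt]
    have hnil : PySem.List.pyRange 2 (pvISqrt 0 + 1) 1 = [] :=
      PySem.List.pyRange_one_eq_nil (by rw [hsq]; norm_num)
    simp [simplify_sqrt_div, simplify_sqrt_div_alt, hnil, PySem.Int.floordiv]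
  · -- 0 < n
    have hInv0 : pvInvA n 1 n 1 := by
      refine ⟨by ring, h0, one_pos, ?_⟩
      intro p hp hp0 hp1
      have := int_prime_two_le hp hp0
      omega
    have hInv := foldA_inv ((pvISqrt n + 1 - 2).toNat) n 1 (pvISqrt n + 1) n 1 rfl
      le_rfl hInv0
    rw [show (1:Int) + 1 = 2 by norm_num] at hInv
    set st := (PySem.List.pyRange 2 (pvISqrt n + 1) 1).foldl pvStepA (n, 1) with hst
    obtain ⟨hE, hA0, hk0, h4⟩ := hInv
    have hsq0 : 1 ≤ pvISqrt n := by
      unfold pvISqrt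
      have : 0 < Nat.sqrt n.toNat := Nat.sqrt_pos.mpr (by omega)
      omega
    have hmax : max 1 (pvISqrt n + 1 - 1) = pvISqrt n := by omega
    rw [hmax] at h4
    -- nA = st.1 is squarefree: any prime square dividing it also divides n
    have hsf : ∀ p : Int, Prime p → ¬ p * p ∣ st.1 := by
      intro p hp hpd
      have hp0 : 0 < p := by
        rcases lt_or_gt_of_ne hp.ne_zero with h | h
        · -- negative prime: -p is also prime and positive, use it
          have hp' : Prime (-p) := hp.neg
          have hp0' : 0 < -p := by omega
          have hpd' : (-p) * (-p) ∣ st.1 := by simpa using hpd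
          have hle : -p ≤ pvISqrt n := by
            have hdn : (-p)*(-p) ∣ n := by
              rw [← hE]
              exact hpd'.mul_left _
            exact le_isqrt (-p) n (by omega) (Int.le_of_dvd (by omega) hdn)
          exact ((h4 (-p) hp' hp0' hle) hpd').elim
        · exact h
      have hle : p ≤ pvISqrt n := by
        have hdn : p*p ∣ n := by
          rw [← hE]
          exact hpd.mul_left _
        exact le_isqrt p n (by omega) (Int.le_of_dvd (by omega) hdn)
      exact h4 p hp hp0 hle hpd
    -- A's k is the largest s with s*s ∣ n in [2, isqrt n + 1); B's fold finds it
    have hkdvd : st.2 * st.2 ∣ n := ⟨st.1, by rw [← hE]⟩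
    have hmaxk : ∀ s : Int, 2 ≤ s → s < pvISqrt n + 1 → s * s ∣ n → s ≤ st.2 := by
      intro s hs1 _ hsd
      rw [← hE] at hsd
      exact max_sq_div st.1 st.2 s hA0 hk0 (by omega) hsf hsd
    have hkfold : (PySem.List.pyRange 2 (pvISqrt n + 1) 1).foldl (pvStepB n) 1 = st.2 := by
      rcases eq_or_lt_of_le (show (1:Int) ≤ st.2 by omega) with hk1 | hk2
      · -- k = 1: no s in the range hits
        rw [← hk1]
        exact foldB_none ((pvISqrt n + 1 - 2).toNat) n 2 (pvISqrt n + 1) 1 rfl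
          (fun s hs1 hs2 hsd => absurd (hmaxk s hs1 hs2 hsd) (by omega))
      · have hkle : st.2 ≤ pvISqrt n :=
          le_isqrt st.2 n (by omega)
            (Int.le_of_dvd h0 hkdvd |>.trans' (by nlinarith [Int.le_of_dvd h0 hkdvd]))
        exact foldB_max ((pvISqrt n + 1 - 2).toNat) n 2 (pvISqrt n + 1) 1 st.2 rfl
          (by omega) (by omega) hkdvd hmaxk
    -- finish: both triples agree componentwise
    have hres : PySem.Int.floordiv n (st.2 * st.2) = st.1 := by
      rw [PySem.Int.floordiv_eq_ediv_of_pos (by nlinarith), ← hE,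
        show st.2 * st.2 * st.1 = (st.2 * st.2) * st.1 by ring]
      exact Int.mul_ediv_cancel_left _ (by nlinarith)
    simp only [simplify_sqrt_div, simplify_sqrt_div_alt, ← hst, hkfold, hres]
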